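-- pv_equiv track=rewrite | github.com/dddwsd/algorithm | programmers/graph/programmers_49190.py | solution
-- ===== SOURCE A (Python) =====
-- from collections import defaultdict
--
-- def solution(arrows):
--     answer = 0
--     move = [[0, 1], [1, 1], [1, 0], [1, -1], [0, -1], [-1, -1], [-1, 0], [-1, 1]]
--     x, y = 0, 0
--     visit = defaultdict(set)
--     for arrow in arrows:
--         # 거리 1짜리 사각형에 대각선으로 이어지는 경우 카운팅을 위해 거리를 2로 늘려서 카운티 되게 함
--         for _ in range(2):
--             dx, dy = move[arrow]
--             nx = x + dx
--             ny = y + dy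
--             if (nx, ny) in visit and (x, y) not in visit[(nx, ny)]:
--                 answer += 1
--                 visit[(x,y)].add((nx, ny))
--                 visit[(nx, ny)].add((x, y))
--             elif (nx, ny) not in visit:
--                 visit[(x, y)].add((nx, ny))
--                 visit[(nx, ny)].add((x, y))
--             x, y = nx, ny
--
--     return answer
-- ===== SOURCE B (Python) =====
-- def solution(arrows):
--     # Euler-characteristic count: trace the path (doubled steps) collecting the
--     # distinct vertices and distinct undirected edges; closed polygons = E - V + 1
--     # for the (connected) traced graph, 0 if no edge was drawn.
--     move = [(0, 1), (1, 1), (1, 0), (1, -1), (0, -1), (-1, -1), (-1, 0), (-1, 1)]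
--     x, y = 0, 0
--     vertices = set()
--     edges = set()
--     for arrow in arrows:
--         for _ in range(2):
--             dx, dy = move[arrow]
--             nx, ny = x + dx, y + dy
--             vertices.add((x, y))
--             vertices.add((nx, ny))
--             edges.add(((x, y), (nx, ny)) if (x, y) <= (nx, ny) else ((nx, ny), (x, y)))
--             x, y = nx, ny
--     return len(edges) - len(vertices) + 1 if edges else 0
-- ===== Notes on version B (the rewrite author's own statement) =====
-- stated objective: alternative
-- what changed: Replaces A's incremental cycle detection (a defaultdict adjacency structure with a counter bumped whenever a step connects two already-visited points not yet adjacent) by a closed-form Euler-characteristic count: walk the same doubled path collecting the set of distinct vertices and of canonicalized undirected edges, then return len(edges) - len(vertices) + 1 (0 if no edge).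
import Mathlib
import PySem

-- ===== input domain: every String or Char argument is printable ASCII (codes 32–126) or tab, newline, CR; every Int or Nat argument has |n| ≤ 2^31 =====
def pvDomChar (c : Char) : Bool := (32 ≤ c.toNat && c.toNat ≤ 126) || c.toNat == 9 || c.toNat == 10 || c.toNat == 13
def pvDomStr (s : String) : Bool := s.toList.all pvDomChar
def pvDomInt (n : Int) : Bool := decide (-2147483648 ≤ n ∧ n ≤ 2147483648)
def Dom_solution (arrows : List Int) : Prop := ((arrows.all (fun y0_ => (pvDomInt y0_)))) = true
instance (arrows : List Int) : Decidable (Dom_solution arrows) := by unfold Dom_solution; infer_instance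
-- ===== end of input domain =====

-- B replaces A's incremental cycle counting by the Euler-characteristic formula
-- E - V + 1 over the sets of distinct vertices and undirected edges of the traced path.

-- ===== PORT A =====
def pvMove : List (Int × Int) :=
  [(0, 1), (1, 1), (1, 0), (1, -1), (0, -1), (-1, -1), (-1, 0), (-1, 1)]

-- A's loop state: (answer, x, y, visit)
abbrev PvAState := Int × Int × Int × PySem.Dict (Int × Int) (PySem.Set (Int × Int))

-- One body of A's inner `for _ in range(2)` loop; `move[arrow]` is in range under Pre_.
def pvStepA (arrow : Int) (s : PvAState) : PvAState :=
  match s with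
  | (answer, x, y, visit) =>
    let d := (PySem.List.pyGet? pvMove arrow).getD (0, 0)
    let nx := x + d.1
    let ny := y + d.2
    if visit.contains (nx, ny) && ! PySem.Set.contains (visit.getD (nx, ny) PySem.Set.empty) (x, y) then
      let visit1 := visit.insert (x, y) (PySem.Set.add (visit.getD (x, y) PySem.Set.empty) (nx, ny))
      let visit2 := visit1.insert (nx, ny) (PySem.Set.add (visit1.getD (nx, ny) PySem.Set.empty) (x, y))
      (answer + 1, nx, ny, visit2)
    else if ! visit.contains (nx, ny) then
      let visit1 := visit.insert (x, y) (PySem.Set.add (visit.getD (x, y) PySem.Set.empty) (nx, ny))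
      let visit2 := visit1.insert (nx, ny) (PySem.Set.add (visit1.getD (nx, ny) PySem.Set.empty) (x, y))
      (answer, nx, ny, visit2)
    else
      (answer, nx, ny, visit)

def solution (arrows : List Int) : Int :=
  (arrows.foldl
    (fun s arrow => (PySem.List.pyRange 0 2 1).foldl (fun s _ => pvStepA arrow s) s)
    ((0 : Int), (0 : Int), (0 : Int), PySem.Dict.empty)).1

-- ===== PORT B =====
-- canonical form of an undirected edge: Python's `(p, q) if p <= q else (q, p)` (tuple lex order)
def pvCanon (p q : Int × Int) : (Int × Int) × (Int × Int) :=
  if p.1 < q.1 ∨ (p.1 = q.1 ∧ p.2 ≤ q.2) then (p, q) else (q, p)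

-- B's loop state: (x, y, vertices, edges)
abbrev PvBState := Int × Int × PySem.Set (Int × Int) × PySem.Set ((Int × Int) × (Int × Int))

def pvStepB (arrow : Int) (s : PvBState) : PvBState :=
  match s with
  | (x, y, verts, edges) =>
    let d := (PySem.List.pyGet? pvMove arrow).getD (0, 0)
    let nx := x + d.1
    let ny := y + d.2
    let verts' := PySem.Set.add (PySem.Set.add verts (x, y)) (nx, ny)
    let edges' := PySem.Set.add edges (pvCanon (x, y) (nx, ny))
    (nx, ny, verts', edges')

def solution_alt (arrows : List Int) : Int :=
  let s := arrows.foldl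
    (fun s arrow => (PySem.List.pyRange 0 2 1).foldl (fun s _ => pvStepB arrow s) s)
    ((0 : Int), (0 : Int), PySem.Set.empty, PySem.Set.empty)
  if s.2.2.2 = [] then 0 else (s.2.2.2.length : Int) - (s.2.2.1.length : Int) + 1

-- ===== PRECONDITION & SPEC =====
-- Pre_ excludes exactly the inputs where `move[arrow]` raises IndexError
-- (both Pythons raise there): every arrow must be a valid index into the 8-element move list.
def Pre_solution (arrows : List Int) : Prop := ∀ a ∈ arrows, -8 ≤ a ∧ a < 8
instance (arrows : List Int) : Decidable (Pre_solution arrows) := by unfold Pre_solution; infer_instance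

def pvWitness_solution : List Int := [6, 6, 6, 4, 4, 4, 2, 2, 2, 0, 0, 0]

def Spec_solution (arrows : List Int) (out : Int) : Prop := out = solution_alt arrows
instance (arrows : List Int) (out : Int) : Decidable (Spec_solution arrows out) := by unfold Spec_solution; infer_instance

-- ===== CLAIM (what is proved, stated in full; the proofs are below) =====
def Claim_equal_solution : Prop := ∀ (arrows : List Int), Dom_solution arrows → Pre_solution arrows → Spec_solution arrows (solution arrows)

-- ===== LEMMAS AND PROOFS =====

-- the coupling invariant between A's state and B's state
structure PvInv (a : PvAState) (b : PvBState) : Prop where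
  hx : a.2.1 = b.1
  hy : a.2.2.1 = b.2.1
  hkeys : ∀ p, a.2.2.2.contains p = true ↔ p ∈ b.2.2.1
  hadj : ∀ p q, q ∈ a.2.2.2.getD p PySem.Set.empty ↔ pvCanon p q ∈ b.2.2.2
  hend : ∀ e ∈ b.2.2.2, e.1 ∈ b.2.2.1 ∧ e.2 ∈ b.2.2.1
  hempty : b.2.2.1 = [] ↔ b.2.2.2 = []
  hpos : b.2.2.1 ≠ [] → (a.2.1, a.2.2.1) ∈ b.2.2.1
  hnv : b.2.2.1.Nodup
  hne : b.2.2.2.Nodup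
  hans : a.1 = if b.2.2.1 = [] then 0 else (b.2.2.2.length : Int) - (b.2.2.1.length : Int) + 1

lemma pvCanon_eq_iff (a b c d : Int × Int) :
    pvCanon a b = pvCanon c d ↔ (a = c ∧ b = d) ∨ (a = d ∧ b = c) := by
  obtain ⟨a1, a2⟩ := a; obtain ⟨b1, b2⟩ := b; obtain ⟨c1, c2⟩ := c; obtain ⟨d1, d2⟩ := d
  simp only [pvCanon]
  split_ifs <;> simp_all [Prod.ext_iff] <;> omega

lemma pvCanon_comm (p q : Int × Int) : pvCanon p q = pvCanon q p := by
  obtain ⟨a1, a2⟩ := p; obtain ⟨b1, b2⟩ := q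
  simp only [pvCanon]
  split_ifs <;> simp_all [Prod.ext_iff] <;> omega

lemma pvCanon_ends (p q : Int × Int) :
    pvCanon p q = (p, q) ∨ pvCanon p q = (q, p) := by
  unfold pvCanon; split_ifs <;> simp

lemma pvMove_ne_zero (arrow : Int) (h1 : -8 ≤ arrow) (h2 : arrow < 8) :
    ((PySem.List.pyGet? pvMove arrow).getD (0, 0)) ≠ ((0 : Int), (0 : Int)) := by
  interval_cases arrow <;> decide


lemma pvKeys_upd (visit : PySem.Dict (Int × Int) (PySem.Set (Int × Int)))
    (verts : PySem.Set (Int × Int)) (p q : Int × Int)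
    (hkeys : ∀ r, visit.contains r = true ↔ r ∈ verts) :
    ∀ r, ((visit.insert p (PySem.Set.add (visit.getD p PySem.Set.empty) q)).insert q
        (PySem.Set.add ((visit.insert p (PySem.Set.add (visit.getD p PySem.Set.empty) q)).getD q
          PySem.Set.empty) p)).contains r = true
      ↔ r ∈ PySem.Set.add (PySem.Set.add verts p) q := by
  intro r
  rw [PySem.Dict.contains_insert, PySem.Dict.contains_insert]
  simp only [Bool.or_eq_true, beq_iff_eq, hkeys r, PySem.Set.mem_add]
  tauto

lemma pvAdj_upd (visit : PySem.Dict (Int × Int) (PySem.Set (Int × Int)))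
    (edges : PySem.Set ((Int × Int) × (Int × Int))) (p q : Int × Int) (hpq : p ≠ q)
    (hadj : ∀ r s, s ∈ visit.getD r PySem.Set.empty ↔ pvCanon r s ∈ edges) :
    ∀ r s, s ∈ ((visit.insert p (PySem.Set.add (visit.getD p PySem.Set.empty) q)).insert q
        (PySem.Set.add ((visit.insert p (PySem.Set.add (visit.getD p PySem.Set.empty) q)).getD q
          PySem.Set.empty) p)).getD r PySem.Set.empty
      ↔ pvCanon r s ∈ PySem.Set.add edges (pvCanon p q) := by
  intro r s
  rw [PySem.Dict.getD_insert, PySem.Dict.getD_insert, PySem.Dict.getD_insert,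
    if_neg (Ne.symm hpq)]
  by_cases hr : r = q
  · subst hr
    rw [if_pos rfl, PySem.Set.mem_add, PySem.Set.mem_add, hadj r s]
    have hc : pvCanon r s = pvCanon p r ↔ s = p := by
      rw [pvCanon_eq_iff]
      simp [hpq.symm]
    rw [hc]
  · rw [if_neg hr]
    by_cases hrp : r = p
    · subst hrp
      rw [if_pos rfl, PySem.Set.mem_add, PySem.Set.mem_add, hadj r s]
      have hc : pvCanon r s = pvCanon r q ↔ s = q := by
        rw [pvCanon_eq_iff]
        simp [hpq]
      rw [hc]
    · rw [if_neg hrp, PySem.Set.mem_add, hadj r s]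
      have hc : ¬ pvCanon r s = pvCanon p q := by
        rw [pvCanon_eq_iff]
        simp [hr, hrp]
      simp [hc]

lemma pvEnd_upd (verts : PySem.Set (Int × Int)) (edges : PySem.Set ((Int × Int) × (Int × Int)))
    (p q : Int × Int) (hend : ∀ e ∈ edges, e.1 ∈ verts ∧ e.2 ∈ verts) :
    ∀ e ∈ PySem.Set.add edges (pvCanon p q),
      e.1 ∈ PySem.Set.add (PySem.Set.add verts p) q ∧ e.2 ∈ PySem.Set.add (PySem.Set.add verts p) q := by
  intro e he
  rcases (PySem.Set.mem_add edges (pvCanon p q) e).mp he with h | h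
  · exact ⟨(PySem.Set.mem_add _ _ _).mpr (Or.inl ((PySem.Set.mem_add _ _ _).mpr (Or.inl (hend e h).1))),
      (PySem.Set.mem_add _ _ _).mpr (Or.inl ((PySem.Set.mem_add _ _ _).mpr (Or.inl (hend e h).2)))⟩
  · rcases pvCanon_ends p q with hc | hc <;> rw [hc] at h <;> subst h <;>
      exact ⟨by simp [PySem.Set.mem_add], by simp [PySem.Set.mem_add]⟩

lemma pvStep_inv (arrow : Int) (h1 : -8 ≤ arrow) (h2 : arrow < 8)
    (a : PvAState) (b : PvBState) (h : PvInv a b) :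
    PvInv (pvStepA arrow a) (pvStepB arrow b) := by
  obtain ⟨ans, x, y, visit⟩ := a
  obtain ⟨vx, vy, verts, edges⟩ := b
  obtain ⟨hx, hy, hkeys, hadj, hend, hempty, hpos, hnv, hne, hans⟩ := h
  dsimp only at hx hy hkeys hadj hend hempty hpos hnv hne hans
  subst hx; subst hy
  have hdne : ((PySem.List.pyGet? pvMove arrow).getD (0, 0)) ≠ ((0 : Int), (0 : Int)) :=
    pvMove_ne_zero arrow h1 h2
  simp only [pvStepA, pvStepB]
  set d := (PySem.List.pyGet? pvMove arrow).getD (0, 0) with hd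
  have hpq : ((x, y) : Int × Int) ≠ (x + d.1, y + d.2) := by
    have hdd : ¬ (d.1 = 0 ∧ d.2 = 0) := by
      intro ⟨u1, u2⟩; exact hdne (Prod.ext u1 u2)
    simp only [ne_eq, Prod.mk.injEq, not_and]
    intro hx1 hy1
    exact absurd ⟨by omega, by omega⟩ hdd
  by_cases hq : ((x + d.1, y + d.2) : Int × Int) ∈ verts
  · have hvne : verts ≠ [] := List.ne_nil_of_mem hq
    have hp : ((x, y) : Int × Int) ∈ verts := hpos hvne
    have hcq : visit.contains (x + d.1, y + d.2) = true := (hkeys _).mpr hq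
    by_cases hedge : pvCanon (x, y) (x + d.1, y + d.2) ∈ edges
    · -- q visited and edge already present: A's third branch, B's adds are no-ops
      have hce : PySem.Set.contains (visit.getD (x + d.1, y + d.2) PySem.Set.empty) (x, y) = true := by
        rw [PySem.Set.contains_iff, hadj, pvCanon_comm]
        exact hedge
      rw [hcq, hce]
      have hv' : PySem.Set.add (PySem.Set.add verts (x, y)) (x + d.1, y + d.2) = verts := by
        rw [PySem.Set.add_of_mem hp, PySem.Set.add_of_mem hq]
      have he' : PySem.Set.add edges (pvCanon (x, y) (x + d.1, y + d.2)) = edges := by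
        rw [PySem.Set.add_of_mem hedge]
      simp only [Bool.not_true, Bool.and_false, Bool.false_eq_true, if_false, hv', he']
      exact ⟨rfl, rfl, hkeys, hadj, hend, hempty, fun _ => hq, hnv, hne, hans⟩
    · -- q visited, edge new: A counts one more cycle; B gains one edge, no vertex
      have hce : PySem.Set.contains (visit.getD (x + d.1, y + d.2) PySem.Set.empty) (x, y) = false := by
        rw [Bool.eq_false_iff]
        intro hT
        rw [PySem.Set.contains_iff, hadj, pvCanon_comm] at hT
        exact hedge hT
      rw [hcq, hce]
      have he' : PySem.Set.add edges (pvCanon (x, y) (x + d.1, y + d.2)) =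
          edges ++ [pvCanon (x, y) (x + d.1, y + d.2)] := PySem.Set.add_of_not_mem hedge
      simp only [Bool.not_false, Bool.and_true, if_true]
      refine ⟨rfl, rfl, pvKeys_upd visit verts _ _ hkeys, pvAdj_upd visit edges _ _ hpq hadj,
        pvEnd_upd verts edges _ _ hend, ?_, ?_, PySem.Set.nodup_add _ _ (PySem.Set.nodup_add _ _ hnv),
        PySem.Set.nodup_add _ _ hne, ?_⟩
      · constructor <;> intro hnil
        · exact absurd hnil (by
            have : ((x + d.1, y + d.2) : Int × Int) ∈ PySem.Set.add (PySem.Set.add verts (x, y)) (x + d.1, y + d.2) :=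
              (PySem.Set.mem_add _ _ _).mpr (Or.inr rfl)
            exact List.ne_nil_of_mem this)
        · exact absurd hnil (by
            have : pvCanon (x, y) (x + d.1, y + d.2) ∈ PySem.Set.add edges (pvCanon (x, y) (x + d.1, y + d.2)) :=
              (PySem.Set.mem_add _ _ _).mpr (Or.inr rfl)
            exact List.ne_nil_of_mem this)
      · intro _
        exact (PySem.Set.mem_add _ _ _).mpr (Or.inr rfl)
      · have hvne' : PySem.Set.add (PySem.Set.add verts (x, y)) (x + d.1, y + d.2) ≠ [] := by
          have : ((x + d.1, y + d.2) : Int × Int) ∈ PySem.Set.add (PySem.Set.add verts (x, y)) (x + d.1, y + d.2) :=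
            (PySem.Set.mem_add _ _ _).mpr (Or.inr rfl)
          exact List.ne_nil_of_mem this
        rw [if_neg hvne', PySem.Set.add_of_mem hp, PySem.Set.add_of_mem hq, he', List.length_append]
        rw [hans, if_neg hvne]
        simp only [List.length_singleton]
        push_cast
        omega
  · -- q unvisited: A's elif branch; B gains one edge and (at least) the vertex q
    have hcq : visit.contains (x + d.1, y + d.2) = false := by
      rw [Bool.eq_false_iff]
      intro hT
      exact hq ((hkeys _).mp hT)
    have hedge : pvCanon (x, y) (x + d.1, y + d.2) ∉ edges := by
      intro hIn
      rcases pvCanon_ends (x, y) (x + d.1, y + d.2) with hc | hc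
      · have := (hend _ hIn).2; rw [hc] at this; exact hq this
      · have := (hend _ hIn).1; rw [hc] at this; exact hq this
    have he' : PySem.Set.add edges (pvCanon (x, y) (x + d.1, y + d.2)) =
        edges ++ [pvCanon (x, y) (x + d.1, y + d.2)] := PySem.Set.add_of_not_mem hedge
    rw [hcq]
    simp only [Bool.false_and, Bool.false_eq_true, if_false, Bool.not_false, if_true]
    refine ⟨rfl, rfl, pvKeys_upd visit verts _ _ hkeys, pvAdj_upd visit edges _ _ hpq hadj,
      pvEnd_upd verts edges _ _ hend, ?_, ?_, PySem.Set.nodup_add _ _ (PySem.Set.nodup_add _ _ hnv),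
      PySem.Set.nodup_add _ _ hne, ?_⟩
    · constructor <;> intro hnil
      · exact absurd hnil (by
          have : ((x + d.1, y + d.2) : Int × Int) ∈ PySem.Set.add (PySem.Set.add verts (x, y)) (x + d.1, y + d.2) :=
            (PySem.Set.mem_add _ _ _).mpr (Or.inr rfl)
          exact List.ne_nil_of_mem this)
      · exact absurd hnil (by
          have : pvCanon (x, y) (x + d.1, y + d.2) ∈ PySem.Set.add edges (pvCanon (x, y) (x + d.1, y + d.2)) :=
            (PySem.Set.mem_add _ _ _).mpr (Or.inr rfl)
          exact List.ne_nil_of_mem this)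
    · intro _
      exact (PySem.Set.mem_add _ _ _).mpr (Or.inr rfl)
    · have hvne' : PySem.Set.add (PySem.Set.add verts (x, y)) (x + d.1, y + d.2) ≠ [] := by
        have : ((x + d.1, y + d.2) : Int × Int) ∈ PySem.Set.add (PySem.Set.add verts (x, y)) (x + d.1, y + d.2) :=
          (PySem.Set.mem_add _ _ _).mpr (Or.inr rfl)
        exact List.ne_nil_of_mem this
      rw [if_neg hvne', he', List.length_append]
      by_cases hv0 : verts = []
      · subst hv0
        have he0 : edges = [] := hempty.mp rfl
        subst he0
        have hstep1 : PySem.Set.add ([] : PySem.Set (Int × Int)) (x, y) = [(x, y)] :=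
          PySem.Set.add_of_not_mem (by simp)
        have hstep2 : PySem.Set.add [((x, y) : Int × Int)] (x + d.1, y + d.2) = [(x, y), (x + d.1, y + d.2)] :=
          PySem.Set.add_of_not_mem (by
            intro hmem
            rcases List.mem_singleton.mp hmem with hEq
            exact hpq hEq.symm)
        rw [hstep1, hstep2, hans, if_pos rfl]
        simp
      · have hp : ((x, y) : Int × Int) ∈ verts := hpos hv0
        rw [PySem.Set.add_of_mem hp, PySem.Set.add_of_not_mem hq, List.length_append]
        rw [hans, if_neg hv0]
        simp only [List.length_singleton]
        push_cast
        omega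

lemma pvInv_init : PvInv ((0 : Int), (0 : Int), (0 : Int), PySem.Dict.empty)
    ((0 : Int), (0 : Int), PySem.Set.empty, PySem.Set.empty) := by
  constructor <;> simp [PySem.Set.empty, PySem.Dict.getD_empty]

lemma pvInv_fold (arrows : List Int) (hpre : ∀ a ∈ arrows, -8 ≤ a ∧ a < 8)
    (a : PvAState) (b : PvBState) (h : PvInv a b) :
    PvInv (arrows.foldl (fun s arrow => (PySem.List.pyRange 0 2 1).foldl (fun s _ => pvStepA arrow s) s) a)
          (arrows.foldl (fun s arrow => (PySem.List.pyRange 0 2 1).foldl (fun s _ => pvStepB arrow s) s) b) := by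
  induction arrows generalizing a b with
  | nil => exact h
  | cons hd tl ih =>
    obtain ⟨hh1, hh2⟩ := hpre hd (by simp)
    have hrange : PySem.List.pyRange 0 2 1 = [0, 1] := by decide
    simp only [List.foldl_cons, hrange]
    exact ih (fun x hx => hpre x (by simp [hx]))
      _ _ (pvStep_inv hd hh1 hh2 _ _ (pvStep_inv hd hh1 hh2 _ _ h))

-- ===== VERDICT (by name: the statement is the Claim_ definition above) =====
theorem solution_spec : Claim_equal_solution := by
  intro arrows _hdom hpre
  unfold Spec_solution solution solution_alt
  have h := pvInv_fold arrows hpre _ _ pvInv_init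
  set a := arrows.foldl (fun s arrow => (PySem.List.pyRange 0 2 1).foldl (fun s _ => pvStepA arrow s) s)
    ((0 : Int), (0 : Int), (0 : Int), PySem.Dict.empty) with ha
  set b := arrows.foldl (fun s arrow => (PySem.List.pyRange 0 2 1).foldl (fun s _ => pvStepB arrow s) s)
    ((0 : Int), (0 : Int), PySem.Set.empty, PySem.Set.empty) with hb
  rcases h with ⟨_, _, _, _, _, hempty, _, _, _, hans⟩
  by_cases hv : b.2.2.1 = []
  · simp [hans, hv, hempty.mp hv]
  · have he : ¬ b.2.2.2 = [] := fun hE => hv (hempty.mpr hE)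
    simp [hans, hv, he]
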